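-- pv_equiv track=rewrite | github.com/pixelatedempathy/ai | models/therapeutic_dataset_loader.py | _has_crisis_escalation
-- ===== SOURCE A (Python) =====
-- from typing import Any, Dict, Generator, List, Optional, Tuple
--
-- def _has_crisis_escalation(conversation: Dict[str, Any]) -> bool:
--     """Check if conversation has crisis escalation without resolution."""
--     messages = conversation.get("messages", [])
--
--     has_crisis = False
--     last_response_helps = True
--
--     for msg in messages:
--         content = msg.get("content", "").lower()
--
--         # Detect crisis signals
--         crisis_keywords = [
--             "suicide",
--             "self harm",
--             "kill myself",
--             "dying",
--         ]
--         if any(keyword in content for keyword in crisis_keywords):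
--             has_crisis = True
--
--         # Check if last response from therapist addresses it
--         if has_crisis and msg.get("role") == "assistant":
--             help_keywords = [
--                 "emergency",
--                 "crisis",
--                 "professional",
--                 "safe",
--                 "help",
--                 "therapist",
--             ]
--             last_response_helps = any(
--                 keyword in content for keyword in help_keywords
--             )
--
--     return has_crisis and not last_response_helps
-- ===== SOURCE B (Python) =====
-- CRISIS_KEYWORDS = ("suicide", "self harm", "kill myself", "dying")
-- HELP_KEYWORDS = ("emergency", "crisis", "professional", "safe", "help", "therapist")
--
--
-- def _has_crisis_escalation(conversation):
--     """Escalation iff the last assistant message at-or-after the first crisis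
--     signal exists and lacks every help keyword."""
--     messages = conversation.get("messages", [])
--     # suffix of messages starting at the first crisis-bearing message
--     rest = None
--     for i, msg in enumerate(messages):
--         if any(k in msg.get("content", "").lower() for k in CRISIS_KEYWORDS):
--             rest = messages[i:]
--             break
--     if rest is None:
--         return False
--     last = None
--     for msg in rest:
--         if msg.get("role") == "assistant":
--             last = msg
--     if last is None:
--         return False
--     content = last.get("content", "").lower()
--     return not any(k in content for k in HELP_KEYWORDS)
-- ===== Notes on version B (the rewrite author's own statement) =====
-- stated objective: alternative
-- what changed: A threads a (has_crisis, last_response_helps) state machine through one fold over all messages; B decomposes the task into three plain scans: find the suffix at the first crisis message, pick the last assistant message in that suffix, and test that single message for help keywords.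
import Mathlib
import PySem

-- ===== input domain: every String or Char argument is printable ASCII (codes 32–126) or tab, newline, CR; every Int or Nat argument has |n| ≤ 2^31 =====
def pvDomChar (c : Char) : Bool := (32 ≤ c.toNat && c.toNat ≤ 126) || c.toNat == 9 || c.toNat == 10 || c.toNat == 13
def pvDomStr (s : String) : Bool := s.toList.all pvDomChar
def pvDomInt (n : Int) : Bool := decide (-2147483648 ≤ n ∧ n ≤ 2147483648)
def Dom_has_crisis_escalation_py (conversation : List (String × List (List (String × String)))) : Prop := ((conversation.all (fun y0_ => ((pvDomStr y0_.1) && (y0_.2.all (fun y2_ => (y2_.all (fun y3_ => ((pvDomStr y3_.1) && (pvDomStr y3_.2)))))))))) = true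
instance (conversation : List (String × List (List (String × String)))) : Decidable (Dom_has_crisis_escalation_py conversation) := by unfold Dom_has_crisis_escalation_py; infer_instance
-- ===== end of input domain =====

-- B decomposes A's single stateful fold into three plain scans (find first crisis message,
-- last assistant message of that suffix, help-keyword test on it); same cost, different structure.

-- ===== PORT A =====
-- one step of A's for-loop over messages, state = (has_crisis, last_response_helps)
def pvStepA (st : Bool × Bool) (msg : List (String × String)) : Bool × Bool :=
  let content := PySem.Str.lower ((PySem.Dict.mk msg).getD "content" "")
  let hasCrisis :=
    st.1 || (["suicide", "self harm", "kill myself", "dying"].any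
              (fun k => PySem.Str.isIn k content))
  let lastHelps :=
    if hasCrisis && ((PySem.Dict.mk msg).get? "role" == some "assistant") then
      ["emergency", "crisis", "professional", "safe", "help", "therapist"].any
        (fun k => PySem.Str.isIn k content)
    else st.2
  (hasCrisis, lastHelps)

def has_crisis_escalation_py (conversation : List (String × List (List (String × String)))) : Bool :=
  let messages := (PySem.Dict.mk conversation).getD "messages" []
  let st := messages.foldl pvStepA (false, true)
  st.1 && !st.2

-- ===== PORT B =====
def pvCrisisMsg (msg : List (String × String)) : Bool :=
  ["suicide", "self harm", "kill myself", "dying"].any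
    (fun k => PySem.Str.isIn k (PySem.Str.lower ((PySem.Dict.mk msg).getD "content" "")))

def pvHelpContent (content : String) : Bool :=
  ["emergency", "crisis", "professional", "safe", "help", "therapist"].any
    (fun k => PySem.Str.isIn k content)

-- B's first loop: the suffix of messages starting at the first crisis-bearing one
def pvCrisisSuffix : List (List (String × String)) → Option (List (List (String × String)))
  | [] => none
  | m :: t => if pvCrisisMsg m then some (m :: t) else pvCrisisSuffix t

def has_crisis_escalation_py_alt (conversation : List (String × List (List (String × String)))) : Bool :=
  let messages := (PySem.Dict.mk conversation).getD "messages" []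
  match pvCrisisSuffix messages with
  | none => false
  | some rest =>
    -- B's second loop: keep the last assistant message seen
    match rest.foldl
        (fun acc msg =>
          if (PySem.Dict.mk msg).get? "role" == some "assistant" then some msg else acc)
        none with
    | none => false
    | some last =>
      ! pvHelpContent (PySem.Str.lower ((PySem.Dict.mk last).getD "content" ""))

-- ===== PRECONDITION & SPEC =====
def Spec_has_crisis_escalation_py (conversation : List (String × List (List (String × String)))) (out : Bool) : Prop := out = has_crisis_escalation_py_alt conversation
instance (conversation : List (String × List (List (String × String)))) (out : Bool) : Decidable (Spec_has_crisis_escalation_py conversation out) := by unfold Spec_has_crisis_escalation_py; infer_instance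

-- ===== CLAIM (what is proved, stated in full; the proofs are below) =====
def Claim_equal_has_crisis_escalation_py : Prop := ∀ (conversation : List (String × List (List (String × String)))), Dom_has_crisis_escalation_py conversation → Spec_has_crisis_escalation_py conversation (has_crisis_escalation_py conversation)

-- ===== LEMMAS AND PROOFS =====

-- proof-side helpers (below the claim block; used only by the lemmas)
def pvRole (msg : List (String × String)) : Bool :=
  (PySem.Dict.mk msg).get? "role" == some "assistant"

def pvHelpMsg (msg : List (String × String)) : Bool :=
  pvHelpContent (PySem.Str.lower ((PySem.Dict.mk msg).getD "content" ""))

-- last assistant message of a list, as a structural recursion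
def pvLastAssist : List (List (String × String)) → Option (List (String × String))
  | [] => none
  | m :: t =>
    match pvLastAssist t with
    | some x => some x
    | none => if pvRole m then some m else none

-- pvStepA, written with the proof-side predicates (definitional)
theorem stepA_eq (st : Bool × Bool) (m : List (String × String)) :
    pvStepA st m =
      (st.1 || pvCrisisMsg m,
       if (st.1 || pvCrisisMsg m) && pvRole m then pvHelpMsg m else st.2) := rfl

-- A's fold once has_crisis is true: has_crisis stays true and last_response_helps
-- ends as the help-test of the last assistant message (or the incoming value)
theorem foldA_true (t : List (List (String × String))) (l : Bool) :
    t.foldl pvStepA (true, l) =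
      (true, match pvLastAssist t with
             | none => l
             | some m => pvHelpMsg m) := by
  induction t generalizing l with
  | nil => rfl
  | cons m t ih =>
    show t.foldl pvStepA (pvStepA (true, l) m) = _
    have hstep : pvStepA (true, l) m =
        (true, if pvRole m then pvHelpMsg m else l) := by
      rw [stepA_eq]; simp
    rw [hstep, ih]
    cases h : pvLastAssist t with
    | some x => simp [pvLastAssist, h]
    | none =>
      by_cases hr : pvRole m = true <;> simp [pvLastAssist, h, hr]

-- B's second fold computes pvLastAssist
theorem foldB_last (t : List (List (String × String))) (acc : Option (List (String × String))) :
    t.foldl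
        (fun acc msg =>
          if (PySem.Dict.mk msg).get? "role" == some "assistant" then some msg else acc)
        acc =
      (match pvLastAssist t with
       | none => acc
       | some x => some x) := by
  induction t generalizing acc with
  | nil => rfl
  | cons m t ih =>
    show t.foldl _ (if pvRole m then some m else acc) = _
    rw [ih]
    cases h : pvLastAssist t with
    | some x => simp [pvLastAssist, h]
    | none =>
      by_cases hr : pvRole m = true <;> simp [pvLastAssist, h, hr]

-- the two programs agree on any list of messages
theorem core_eq (msgs : List (List (String × String))) :
    (let st := msgs.foldl pvStepA (false, true); st.1 && !st.2) =
      (match pvCrisisSuffix msgs with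
       | none => false
       | some rest =>
         match rest.foldl
             (fun acc msg =>
               if (PySem.Dict.mk msg).get? "role" == some "assistant" then some msg else acc)
             none with
         | none => false
         | some last =>
           ! pvHelpContent (PySem.Str.lower ((PySem.Dict.mk last).getD "content" ""))) := by
  induction msgs with
  | nil => rfl
  | cons m t ih =>
    by_cases hc : pvCrisisMsg m = true
    · -- first crisis message: A's state becomes (true, _), B takes this suffix
      have hstep : pvStepA (false, true) m =
          (true, if pvRole m then pvHelpMsg m else true) := by
        rw [stepA_eq]; simp [hc]
      show (let st := t.foldl pvStepA (pvStepA (false, true) m); st.1 && !st.2) = _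
      rw [hstep, foldA_true]
      simp only [pvCrisisSuffix, hc, if_pos]
      show _ = (match (m :: t).foldl _ none with
                | none => false
                | some last => ! pvHelpContent (PySem.Str.lower ((PySem.Dict.mk last).getD "content" "")))
      have : (m :: t).foldl
          (fun acc msg =>
            if (PySem.Dict.mk msg).get? "role" == some "assistant" then some msg else acc)
          none = t.foldl _ (if pvRole m then some m else none) := rfl
      rw [this, foldB_last]
      cases h : pvLastAssist t with
      | some x => simp [pvHelpMsg]
      | none => by_cases hr : pvRole m = true <;> simp [hr, pvHelpMsg]
    · -- no crisis yet: A's state is unchanged, B skips this message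
      have hstep : pvStepA (false, true) m = (false, true) := by
        rw [stepA_eq]
        rw [Bool.not_eq_true] at hc
        simp [hc]
      show (let st := t.foldl pvStepA (pvStepA (false, true) m); st.1 && !st.2) = _
      rw [hstep]
      simpa [pvCrisisSuffix, hc] using ih

-- ===== VERDICT (by name: the statement is the Claim_ definition above) =====
theorem has_crisis_escalation_py_spec : Claim_equal_has_crisis_escalation_py := by
  intro conversation _
  show has_crisis_escalation_py conversation = has_crisis_escalation_py_alt conversation
  unfold has_crisis_escalation_py has_crisis_escalation_py_alt
  exact core_eq _
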